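-- pv_equiv track=rewrite | github.com/EloyTejero/Algo1-IP | p10integradora/ejs.py | torneo_de_gallinas
-- ===== SOURCE A (Python) =====
-- def torneo_de_gallinas(estrategias:dict[str,str]) -> dict[str,int]:
--     resultados:dict[str,int] = {}
--     for jugador in estrategias.keys():
--         estrategia_jugador:str = estrategias[jugador]
--         resultados[jugador] = 0
--         for otro_jugador in estrategias.keys():
--             if otro_jugador != jugador:
--                 estrategia_otro_jugador:str = estrategias[otro_jugador]
--                 if estrategia_jugador == estrategia_otro_jugador:
--                     if estrategia_jugador == "d":
--                         resultados[jugador] -= 10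
--                     elif estrategia_jugador == "nd":
--                         resultados[jugador] -= 5
--                 else:
--                     if estrategia_jugador == "d":
--                         resultados[jugador] -= 15
--                     else:
--                         resultados[jugador] += 10
--     return resultados
-- ===== SOURCE B (Python) =====
-- def torneo_de_gallinas(estrategias: dict[str, str]) -> dict[str, int]:
--     n = len(estrategias)
--     counts: dict[str, int] = {}
--     for s in estrategias.values():
--         counts[s] = counts.get(s, 0) + 1
--     resultados: dict[str, int] = {}
--     for jugador, s in estrategias.items():
--         c = counts[s]
--         if s == "d":
--             resultados[jugador] = (c - 1) * (-10) + (n - c) * (-15)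
--         elif s == "nd":
--             resultados[jugador] = (c - 1) * (-5) + (n - c) * 10
--         else:
--             resultados[jugador] = (n - c) * 10
--     return resultados
-- ===== Notes on version B (the rewrite author's own statement) =====
-- stated objective: faster
-- what changed: B replaces A's all-pairs double loop over players by a single counting pass over the strategy values plus a per-player closed formula from the counts.
import Mathlib
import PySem

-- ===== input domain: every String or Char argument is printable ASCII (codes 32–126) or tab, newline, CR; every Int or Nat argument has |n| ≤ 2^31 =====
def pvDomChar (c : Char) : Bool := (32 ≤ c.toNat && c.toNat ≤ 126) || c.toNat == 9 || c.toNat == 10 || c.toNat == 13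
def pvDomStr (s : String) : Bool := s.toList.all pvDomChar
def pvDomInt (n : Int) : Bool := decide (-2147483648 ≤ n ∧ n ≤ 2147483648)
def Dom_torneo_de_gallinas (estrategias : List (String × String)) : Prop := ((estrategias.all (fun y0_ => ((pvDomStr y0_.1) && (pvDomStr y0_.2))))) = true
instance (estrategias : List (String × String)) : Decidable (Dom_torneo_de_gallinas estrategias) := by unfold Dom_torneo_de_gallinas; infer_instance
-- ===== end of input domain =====

-- B replaces A's all-pairs double loop by one counting pass over the strategies and a per-player closed formula.

-- ===== PORT A =====
-- body of A's inner 'for otro_jugador in estrategias.keys(): …' loop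
-- (the binding estrategia_otro_jugador = estrategias[otro_jugador] is inlined)
def stepA (est : PySem.Dict String String) (jugador estrategia_jugador : String)
    (resultados : PySem.Dict String Int) (otro_jugador : String) : PySem.Dict String Int :=
  if otro_jugador ≠ jugador then
    if estrategia_jugador == est.getD otro_jugador "" then
      if estrategia_jugador == "d" then resultados.modify jugador 0 (· - 10)
      else if estrategia_jugador == "nd" then resultados.modify jugador 0 (· - 5)
      else resultados
    else
      if estrategia_jugador == "d" then resultados.modify jugador 0 (· - 15)
      else resultados.modify jugador 0 (· + 10)
  else resultados

-- A's inner loop, generalized over the folded list for the proofs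
def innerGo (est : PySem.Dict String String) (jugador estrategia_jugador : String)
    (os : List String) (resultados : PySem.Dict String Int) : PySem.Dict String Int :=
  os.foldl (stepA est jugador estrategia_jugador) resultados

-- literal port of A: estrategias viewed as a dict, nested loops over its keys
-- (estrategias[x] is ported as getD x "" — the looked-up key is always one of the dict's keys, so no KeyError)
def torneo_de_gallinas (estrategias : List (String × String)) : List (String × Int) :=
  let est : PySem.Dict String String := PySem.Dict.mk estrategias
  (est.keys.foldl (fun resultados jugador =>
      innerGo est jugador (est.getD jugador "") est.keys (resultados.insert jugador 0))
    PySem.Dict.empty).items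

-- ===== PORT B =====
-- literal port of B: one counting pass over the values, then a per-player closed formula
def torneo_de_gallinas_alt (estrategias : List (String × String)) : List (String × Int) :=
  let n : Int := estrategias.length
  let counts : PySem.Dict String Int :=
    (estrategias.map Prod.snd).foldl (fun d s => d.insert s (d.getD s 0 + 1)) PySem.Dict.empty
  estrategias.map (fun p =>
    let c := counts.getD p.2 0
    if p.2 == "d" then (p.1, (c - 1) * (-10) + (n - c) * (-15))
    else if p.2 == "nd" then (p.1, (c - 1) * (-5) + (n - c) * 10)
    else (p.1, (n - c) * 10))

-- ===== PRECONDITION & SPEC =====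
-- Pre_ excludes assoc lists with duplicate player names: a Python dict cannot contain them, they are an artefact of the assoc-list encoding.
def Pre_torneo_de_gallinas (estrategias : List (String × String)) : Prop :=
  (estrategias.map Prod.fst).Nodup
instance (estrategias : List (String × String)) : Decidable (Pre_torneo_de_gallinas estrategias) := by unfold Pre_torneo_de_gallinas; infer_instance

def pvWitness_torneo_de_gallinas : (List (String × String)) := [("ana", "d"), ("bob", "nd"), ("eva", "x")]

def Spec_torneo_de_gallinas (estrategias : List (String × String)) (out : List (String × Int)) : Prop := out = torneo_de_gallinas_alt estrategias
instance (estrategias : List (String × String)) (out : List (String × Int)) : Decidable (Spec_torneo_de_gallinas estrategias out) := by unfold Spec_torneo_de_gallinas; infer_instance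

-- ===== CLAIM (what is proved, stated in full; the proofs are below) =====
def Claim_equal_torneo_de_gallinas : Prop := ∀ (estrategias : List (String × String)), Dom_torneo_de_gallinas estrategias → Pre_torneo_de_gallinas estrategias → Spec_torneo_de_gallinas estrategias (torneo_de_gallinas estrategias)

-- ===== LEMMAS AND PROOFS =====

-- points of one encounter of a player playing ej against a player playing eo (A's inner-loop case analysis)
def contrib (ej eo : String) : Int :=
  if ej == eo then (if ej == "d" then -10 else if ej == "nd" then -5 else 0)
  else (if ej == "d" then -15 else 10)

-- total score of player k as A computes it
def scoreA (est : PySem.Dict String String) (k : String) : Int :=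
  ((est.keys.filter (fun o => o ≠ k)).map (fun o => contrib (est.getD k "") (est.getD o ""))).sum

-- A's outer loop, generalized over the folded key list
def outerGo (est : PySem.Dict String String) (js : List String)
    (r : PySem.Dict String Int) : PySem.Dict String Int :=
  js.foldl (fun resultados jugador =>
      innerGo est jugador (est.getD jugador "") est.keys (resultados.insert jugador 0)) r

lemma stepA_keys (est : PySem.Dict String String) (j ej o : String)
    (r : PySem.Dict String Int) (hc : r.contains j = true) :
    (stepA est j ej r o).keys = r.keys := by
  have h : ∀ f : Int → Int, (r.modify j 0 f).keys = r.keys := fun f => by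
    rw [PySem.Dict.keys_modify, PySem.Dict.keys_insert_of_contains _ _ hc]
  unfold stepA
  split_ifs <;> first | rfl | exact h _

lemma stepA_getD_self (est : PySem.Dict String String) (j ej o : String)
    (r : PySem.Dict String Int) :
    (stepA est j ej r o).getD j 0 =
      r.getD j 0 + (if o ≠ j then contrib ej (est.getD o "") else 0) := by
  unfold stepA contrib
  split_ifs <;> simp [PySem.Dict.getD_modify_self] <;> ring

lemma stepA_getD_ne (est : PySem.Dict String String) (j ej o k : String)
    (r : PySem.Dict String Int) (hk : k ≠ j) :
    (stepA est j ej r o).getD k 0 = r.getD k 0 := by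
  unfold stepA
  split_ifs <;> first | rfl | exact PySem.Dict.getD_modify_of_ne _ _ _ hk

lemma innerGo_keys (est : PySem.Dict String String) (j ej : String) (os : List String)
    (r : PySem.Dict String Int) (hj : j ∈ r.keys) : (innerGo est j ej os r).keys = r.keys := by
  induction os generalizing r with
  | nil => rfl
  | cons o os ih =>
    have hc : r.contains j = true := (PySem.Dict.contains_iff_mem_keys r j).mpr hj
    have hk := stepA_keys est j ej o r hc
    simp only [innerGo, List.foldl_cons]
    rw [show List.foldl (stepA est j ej) (stepA est j ej r o) os = innerGo est j ej os (stepA est j ej r o) from rfl,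
      ih _ (hk ▸ hj), hk]

lemma innerGo_getD_self (est : PySem.Dict String String) (j ej : String) (os : List String)
    (r : PySem.Dict String Int) :
    (innerGo est j ej os r).getD j 0 =
      r.getD j 0 + ((os.filter (fun o => o ≠ j)).map (fun o => contrib ej (est.getD o ""))).sum := by
  induction os generalizing r with
  | nil => simp [innerGo]
  | cons o os ih =>
    simp only [innerGo, List.foldl_cons] at ih ⊢
    rw [ih, stepA_getD_self]
    by_cases ho : o ≠ j <;> simp [ho] <;> ring

lemma innerGo_getD_ne (est : PySem.Dict String String) (j ej k : String) (os : List String)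
    (r : PySem.Dict String Int) (hk : k ≠ j) :
    (innerGo est j ej os r).getD k 0 = r.getD k 0 := by
  induction os generalizing r with
  | nil => rfl
  | cons o os ih =>
    simp only [innerGo, List.foldl_cons] at ih ⊢
    rw [ih, stepA_getD_ne _ _ _ _ _ _ hk]

lemma outerGo_keys (est : PySem.Dict String String) (js : List String)
    (r : PySem.Dict String Int) (hnd : js.Nodup) (hfresh : ∀ j ∈ js, j ∉ r.keys) :
    (outerGo est js r).keys = r.keys ++ js := by
  induction js generalizing r with
  | nil => simp [outerGo]
  | cons j js ih =>
    simp only [outerGo, List.foldl_cons] at ih ⊢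
    have hc : r.contains j = false := by
      rw [PySem.Dict.contains_eq_decide_mem_keys]
      simpa using hfresh j (by simp)
    have hki : (r.insert j (0 : Int)).keys = r.keys ++ [j] :=
      PySem.Dict.keys_insert_of_not_contains r 0 hc
    have hjin : j ∈ (r.insert j (0 : Int)).keys := by simp [hki]
    rw [ih _ hnd.of_cons, innerGo_keys _ _ _ _ _ hjin, hki]
    · simp
    · intro x hx
      rw [innerGo_keys _ _ _ _ _ hjin, hki]
      simp only [List.mem_append, List.mem_singleton]
      rintro (h | h)
      · exact hfresh x (by simp [hx]) h
      · exact (List.nodup_cons.mp hnd).1 (h ▸ hx)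

lemma outerGo_getD_ne (est : PySem.Dict String String) (js : List String)
    (r : PySem.Dict String Int) (k : String) (hk : k ∉ js) :
    (outerGo est js r).getD k 0 = r.getD k 0 := by
  induction js generalizing r with
  | nil => rfl
  | cons j js ih =>
    simp only [outerGo, List.foldl_cons] at ih ⊢
    have hkj : k ≠ j := fun h => hk (by simp [h])
    rw [ih _ (fun h => hk (by simp [h])), innerGo_getD_ne _ _ _ _ _ _ hkj,
      PySem.Dict.getD_insert]
    simp [hkj]

lemma outerGo_getD (est : PySem.Dict String String) (js : List String)
    (r : PySem.Dict String Int) (k : String) (hnd : js.Nodup) (hfresh : ∀ j ∈ js, j ∉ r.keys)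
    (hk : k ∈ js) : (outerGo est js r).getD k 0 = scoreA est k := by
  induction js generalizing r with
  | nil => simp at hk
  | cons j js ih =>
    simp only [outerGo, List.foldl_cons] at ih ⊢
    have hc : r.contains j = false := by
      rw [PySem.Dict.contains_eq_decide_mem_keys]
      simpa using hfresh j (by simp)
    have hki : (r.insert j (0 : Int)).keys = r.keys ++ [j] :=
      PySem.Dict.keys_insert_of_not_contains r 0 hc
    have hjin : j ∈ (r.insert j (0 : Int)).keys := by simp [hki]
    rcases List.mem_cons.mp hk with rfl | hkmem
    · have hnotin : k ∉ js := (List.nodup_cons.mp hnd).1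
      rw [show List.foldl _ _ js = outerGo est js
          (innerGo est k (est.getD k "") est.keys (r.insert k 0)) from rfl,
        outerGo_getD_ne _ _ _ _ hnotin, innerGo_getD_self,
        PySem.Dict.getD_insert_self]
      simp [scoreA]
    · apply ih _ hnd.of_cons _ hkmem
      intro x hx
      rw [innerGo_keys _ _ _ _ _ hjin, hki]
      simp only [List.mem_append, List.mem_singleton]
      rintro (h | h)
      · exact hfresh x (by simp [hx]) h
      · exact (List.nodup_cons.mp hnd).1 (h ▸ hx)

-- A's per-encounter points summed over a list of opponents, as a closed formula in counts
lemma sum_contrib (s : String) (l : List (String × String)) :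
    (l.map (fun q => contrib s q.2)).sum =
      (l.countP (fun q => q.2 == s) : Int) * (if s == "d" then -10 else if s == "nd" then -5 else 0)
      + ((l.length : Int) - l.countP (fun q => q.2 == s)) * (if s == "d" then -15 else 10) := by
  induction l with
  | nil => simp
  | cons q l ih =>
    simp only [List.map_cons, List.sum_cons, List.countP_cons, List.length_cons, ih]
    by_cases hq : q.2 = s
    · simp only [contrib, hq, beq_self_eq_true, if_true]
      push_cast
      split_ifs <;> ring
    · have h1 : (q.2 == s) = false := beq_eq_false_iff_ne.mpr hq
      have h2 : (s == q.2) = false := beq_eq_false_iff_ne.mpr (Ne.symm hq)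
      simp only [contrib, h1, h2]
      push_cast
      split_ifs <;> ring

-- the score of a player present exactly once equals B's closed formula
lemma scoreA_eq_formula (estrategias : List (String × String)) (p : String × String)
    (hp : p ∈ estrategias) (hnd : (estrategias.map Prod.fst).Nodup) :
    scoreA (PySem.Dict.mk estrategias) p.1 =
      (let n : Int := estrategias.length
       let c : Int := ((estrategias.map Prod.snd).count p.2 : Int)
       if p.2 == "d" then (c - 1) * (-10) + (n - c) * (-15)
       else if p.2 == "nd" then (c - 1) * (-5) + (n - c) * 10
       else (n - c) * 10) := by
  obtain ⟨l₁, l₂, rfl⟩ := List.append_of_mem hp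
  have hndk : ((l₁ ++ p :: l₂).map Prod.fst).Nodup := hnd
  rw [List.map_append, List.map_cons] at hnd
  have h₁ : p.1 ∉ l₁.map Prod.fst := fun h =>
    (List.disjoint_of_nodup_append hnd) h (by simp)
  have h₂ : p.1 ∉ l₂.map Prod.fst :=
    (List.nodup_cons.mp hnd.of_append_right).1
  have hkeysnd : (PySem.Dict.mk (l₁ ++ p :: l₂)).keys.Nodup := by
    rw [PySem.Dict.keys_mk]; exact hndk
  have hitems : (PySem.Dict.mk (l₁ ++ p :: l₂)).items = l₁ ++ p :: l₂ := rfl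
  have hget : ∀ q : String × String, q ∈ l₁ ++ p :: l₂ →
      (PySem.Dict.mk (l₁ ++ p :: l₂)).getD q.1 "" = q.2 := by
    intro q hq
    exact PySem.Dict.getD_of_mem_items _ (by rw [hitems]; exact (by simpa using hq)) hkeysnd ""
  have hgetp : (PySem.Dict.mk (l₁ ++ p :: l₂)).getD p.1 "" = p.2 :=
    hget p (by simp)
  have hfil : (PySem.Dict.mk (l₁ ++ p :: l₂)).keys.filter (fun o => o ≠ p.1) =
      (l₁ ++ l₂).map Prod.fst := by
    have e₁ : (l₁.map Prod.fst).filter (fun o => o ≠ p.1) = l₁.map Prod.fst :=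
      List.filter_eq_self.mpr (fun a ha => by
        simp only [ne_eq, decide_eq_true_eq]; exact fun h => h₁ (h ▸ ha))
    have e₂ : (l₂.map Prod.fst).filter (fun o => o ≠ p.1) = l₂.map Prod.fst :=
      List.filter_eq_self.mpr (fun a ha => by
        simp only [ne_eq, decide_eq_true_eq]; exact fun h => h₂ (h ▸ ha))
    rw [PySem.Dict.keys_mk, List.map_append, List.map_cons, List.filter_append,
      List.filter_cons, if_neg (by simp), e₁, e₂, List.map_append]
  unfold scoreA
  rw [hgetp, hfil, List.map_map]
  rw [List.map_congr_left (f := (fun o => contrib p.2 ((PySem.Dict.mk (l₁ ++ p :: l₂)).getD o "")) ∘ Prod.fst)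
    (g := fun q => contrib p.2 q.2) (fun q hq => by
      have hq' : q ∈ l₁ ++ p :: l₂ := by
        rcases List.mem_append.mp hq with h | h
        · exact List.mem_append.mpr (Or.inl h)
        · exact List.mem_append.mpr (Or.inr (List.mem_cons_of_mem _ h))
      simp only [Function.comp]
      rw [hget q hq'])]
  rw [sum_contrib]
  have hcount : ((l₁ ++ p :: l₂).map Prod.snd).count p.2 =
      (l₁ ++ l₂).countP (fun q => q.2 == p.2) + 1 := by
    rw [List.count, List.countP_map]
    simp only [List.countP_append, List.countP_cons, Function.comp_def,
      beq_self_eq_true, if_true]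
    omega
  have hlen : (l₁ ++ p :: l₂).length = (l₁ ++ l₂).length + 1 := by simp; omega
  simp only [hcount, hlen]
  push_cast
  split_ifs <;> ring

-- ===== VERDICT (by name: the statement is the Claim_ definition above) =====
theorem torneo_de_gallinas_spec : Claim_equal_torneo_de_gallinas := by
  intro estrategias _ hpre
  unfold Spec_torneo_de_gallinas
  unfold Pre_torneo_de_gallinas at hpre
  have hA : torneo_de_gallinas estrategias =
      (outerGo (PySem.Dict.mk estrategias) (PySem.Dict.mk estrategias).keys
        PySem.Dict.empty).items := rfl
  have hkeysnd : (PySem.Dict.mk estrategias).keys.Nodup := by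
    rw [PySem.Dict.keys_mk]; exact hpre
  have hfresh : ∀ j ∈ (PySem.Dict.mk estrategias).keys,
      j ∉ (PySem.Dict.empty : PySem.Dict String Int).keys := by
    simp [PySem.Dict.keys_empty]
  have hkeys : (outerGo (PySem.Dict.mk estrategias) (PySem.Dict.mk estrategias).keys
      PySem.Dict.empty).keys = (PySem.Dict.mk estrategias).keys := by
    rw [outerGo_keys _ _ _ hkeysnd hfresh, PySem.Dict.keys_empty, List.nil_append]
  have hitems := PySem.Dict.items_eq_map_keys
    (outerGo (PySem.Dict.mk estrategias) (PySem.Dict.mk estrategias).keys PySem.Dict.empty)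
    (by rw [hkeys]; exact hkeysnd) (0 : Int)
  rw [hA, hitems, hkeys,
    List.map_congr_left (fun k hk => by
      rw [outerGo_getD _ _ _ k hkeysnd hfresh hk] :
      ∀ k ∈ (PySem.Dict.mk estrategias).keys,
        (k, (outerGo (PySem.Dict.mk estrategias) (PySem.Dict.mk estrategias).keys
          PySem.Dict.empty).getD k 0) = (k, scoreA (PySem.Dict.mk estrategias) k))]
  rw [PySem.Dict.keys_mk, List.map_map]
  unfold torneo_de_gallinas_alt
  refine List.map_congr_left (fun p hp => ?_)
  have hc : ((estrategias.map Prod.snd).foldl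
      (fun d s => d.insert s (d.getD s 0 + 1)) PySem.Dict.empty).getD p.2 0 =
      (((estrategias.map Prod.snd).count p.2 : Nat) : Int) := by
    rw [PySem.Dict.getD_foldl_insert_add_one, PySem.Dict.getD_empty]
    ring
  simp only [Function.comp]
  rw [scoreA_eq_formula estrategias p hp hpre]
  simp only [hc]
  split_ifs <;> rfl
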